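-- pv_equiv track=rewrite | github.com/zTrix/reprs | reprs.py | pyevals
-- ===== SOURCE A (Python) =====
-- def pyevals(s):
--     st = 0      # 0 for normal, 1 for escape, 2 for \xXX
--     ret = []
--     i = 0
--     while i < len(s):
--         if st == 0:
--             if s[i] == '\\':
--                 st = 1
--             else:
--                 ret.append(s[i])
--         elif st == 1:
--             if s[i] in ('"', "'", "\\", "t", "n", "r"):
--                 if s[i] == 't':
--                     ret.append('\t')
--                 elif s[i] == 'n':
--                     ret.append('\n')
--                 elif s[i] == 'r':
--                     ret.append('\r')
--                 else:
--                     ret.append(s[i])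
--                 st = 0
--             elif s[i] == 'x':
--                 st = 2
--             else:
--                 raise Exception('invalid repr of str %s' % s)
--         else:
--             num = int(s[i:i+2], 16)
--             assert 0 <= num < 256
--             ret.append(chr(num))
--             st = 0
--             i += 1
--         i += 1
--     return ''.join(ret)
-- ===== SOURCE B (Python) =====
-- def pyevals(s):
--     esc = {'t': '\t', 'n': '\n', 'r': '\r', '"': '"', "'": "'", '\\': '\\'}
--     out = []
--     i = 0
--     n = len(s)
--     while i < n:
--         c = s[i]
--         if c != '\\':
--             out.append(c)
--             i += 1
--             continue
--         if i + 1 >= n: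
--             break
--         e = s[i + 1]
--         if e in esc:
--             out.append(esc[e])
--             i += 2
--         elif e == 'x':
--             if i + 2 >= n:
--                 break
--             out.append(chr(int(s[i + 2:i + 4], 16)))
--             i += 4
--         else:
--             raise Exception('invalid repr of str %s' % s)
--     return ''.join(out)
-- ===== Notes on version B (the rewrite author's own statement) =====
-- stated objective: simpler
-- what changed: Replaced A's three-state machine (st=0/1/2 dispatched on every character) with a single lookahead loop that consumes a whole escape at once: a dict maps the six simple escapes, '\x' parses the next 2-char slice directly and jumps 4 ahead, and a trailing '\' or '\x' just breaks; fewer loop iterations and no per-character state dispatch.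
import Mathlib
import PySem

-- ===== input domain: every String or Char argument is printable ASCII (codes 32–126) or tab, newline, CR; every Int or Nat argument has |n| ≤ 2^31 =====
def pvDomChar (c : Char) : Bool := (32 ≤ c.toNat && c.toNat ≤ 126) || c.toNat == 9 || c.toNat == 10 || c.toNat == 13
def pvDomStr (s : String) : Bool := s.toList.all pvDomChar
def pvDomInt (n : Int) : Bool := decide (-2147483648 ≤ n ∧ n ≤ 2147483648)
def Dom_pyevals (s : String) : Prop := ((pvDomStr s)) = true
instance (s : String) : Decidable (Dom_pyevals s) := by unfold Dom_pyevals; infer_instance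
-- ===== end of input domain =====

-- B replaces A's 3-state machine with a single lookahead loop driven by an escape table: simpler decomposition, same cost.

-- ===== PORT A =====
-- literal port of A's while loop: state st (0 normal, 1 after '\', 2 after '\x'),
-- recursion over the remaining characters.  The 1–2-char slice s[i:i+2] in state 2
-- is realised by matching zero/one lookahead characters; int(_,16) is
-- PySem.Int.ofCharsBase?.  The raise branches (invalid escape → Exception,
-- int() → ValueError, failed assert) return [] and are excluded by Pre_pyevals.
def pyevalsLoopA (st : Nat) (cs : List Char) : List Char :=
  match cs with
  | [] => []
  | c :: rest =>
    if st = 0 then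
      if c = '\\' then pyevalsLoopA 1 rest else c :: pyevalsLoopA 0 rest
    else if st = 1 then
      if c = '"' ∨ c = '\'' ∨ c = '\\' ∨ c = 't' ∨ c = 'n' ∨ c = 'r' then
        (if c = 't' then '\t' else if c = 'n' then '\n' else if c = 'r' then '\r' else c)
          :: pyevalsLoopA 0 rest
      else if c = 'x' then pyevalsLoopA 2 rest
      else []                                  -- raise Exception
    else
      -- num = int(s[i:i+2], 16); assert 0 <= num < 256; ret.append(chr(num)); i += 2
      match rest with
      | [] =>                                  -- slice has 1 char
        match PySem.Int.ofCharsBase? [c] 16 with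
        | some num => if 0 ≤ num ∧ num < 256 then [Char.ofNat num.toNat] else []
        | none => []
      | r :: rest' =>                          -- slice has 2 chars
        match PySem.Int.ofCharsBase? [c, r] 16 with
        | some num =>
          if 0 ≤ num ∧ num < 256 then Char.ofNat num.toNat :: pyevalsLoopA 0 rest'
          else []                              -- AssertionError
        | none => []                           -- ValueError from int()

def pyevals (s : String) : String := String.ofList (pyevalsLoopA 0 s.toList)

-- ===== PORT B =====
-- the escape dict of Source B
def pyevalsEsc : PySem.Dict Char Char :=
  PySem.Dict.ofList [('t', '\t'), ('n', '\n'), ('r', '\r'), ('"', '"'), ('\'', '\''), ('\\', '\\')]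

-- literal port of B's lookahead loop; the 1–2-char slice s[i+2:i+4] is realised by
-- matching one/two lookahead characters; break → stop, raise / chr(negative) → []
def pyevalsLoopB (cs : List Char) : List Char :=
  match cs with
  | [] => []
  | c :: rest =>
    if c ≠ '\\' then c :: pyevalsLoopB rest
    else
      match rest with
      | [] => []                               -- break: trailing backslash
      | e :: rest2 =>
        match pyevalsEsc.get? e with
        | some m => m :: pyevalsLoopB rest2
        | none =>
          if e = 'x' then
            match rest2 with
            | [] => []                         -- break: trailing '\x'
            | [d] =>                           -- slice has 1 char
              match PySem.Int.ofCharsBase? [d] 16 with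
              | some num => if 0 ≤ num then [Char.ofNat num.toNat] else []
              | none => []
            | d :: d' :: rest3 =>              -- slice has 2 chars
              match PySem.Int.ofCharsBase? [d, d'] 16 with
              | some num =>
                -- chr(num): raises ValueError for num < 0 (num ≤ 255 here)
                if 0 ≤ num then Char.ofNat num.toNat :: pyevalsLoopB rest3
                else []
              | none => []                     -- ValueError from int()
          else []                              -- raise Exception

def pyevals_alt (s : String) : String := String.ofList (pyevalsLoopB s.toList)

-- ===== PRECONDITION & SPEC =====
-- Pre_ excludes exactly the inputs on which A RAISES: a backslash followed by a
-- character that is not one of " ' \ t n r x (Exception), or '\x' whose following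
-- 1–2-char slice is not accepted by int(_,16) (ValueError) or parses negative,
-- e.g. '\x-5' (AssertionError).  Pre_ is the GRAMMAR of well-formed repr strings
-- (a shape condition on the input: plain chars, the six simple escapes, '\xHH'
-- with a non-negative hex slice, and an optionally cut-off final escape); it is
-- defined structurally over the character list and computes no output of either port.
def pyevalsValid (cs : List Char) : Bool :=
  match cs with
  | [] => true
  | c :: rest =>
    if c = '\\' then
      match rest with
      | [] => true
      | e :: rest2 =>
        if e = '"' ∨ e = '\'' ∨ e = '\\' ∨ e = 't' ∨ e = 'n' ∨ e = 'r' then pyevalsValid rest2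
        else if e = 'x' then
          match rest2 with
          | [] => true
          | [d] =>
            match PySem.Int.ofCharsBase? [d] 16 with
            | some num => decide (0 ≤ num ∧ num < 256)
            | none => false
          | d :: d' :: rest3 =>
            match PySem.Int.ofCharsBase? [d, d'] 16 with
            | some num => decide (0 ≤ num ∧ num < 256) && pyevalsValid rest3
            | none => false
        else false
    else pyevalsValid rest

def Pre_pyevals (s : String) : Prop := pyevalsValid s.toList = true
instance (s : String) : Decidable (Pre_pyevals s) := by unfold Pre_pyevals; infer_instance

def pvWitness_pyevals : String := "a\\n\\\\b"

def Spec_pyevals (s : String) (out : String) : Prop := out = pyevals_alt s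
instance (s : String) (out : String) : Decidable (Spec_pyevals s out) := by unfold Spec_pyevals; infer_instance

-- ===== CLAIM (what is proved, stated in full; the proofs are below) =====
def Claim_equal_pyevals : Prop := ∀ (s : String), Dom_pyevals s → Pre_pyevals s → Spec_pyevals s (pyevals s)

-- ===== LEMMAS AND PROOFS =====

lemma pyevals_loops_eq (n : Nat) :
    ∀ cs : List Char, cs.length ≤ n → pyevalsValid cs = true →
      pyevalsLoopA 0 cs = pyevalsLoopB cs := by
  induction n with
  | zero =>
    intro cs h _
    have : cs = [] := List.length_eq_zero_iff.mp (Nat.le_zero.mp h)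
    subst this; rfl
  | succ n ih =>
    intro cs hlen hv
    match cs with
    | [] => rfl
    | c :: rest =>
      by_cases hc : c = '\\'
      · subst hc
        rw [show pyevalsLoopA 0 ('\\' :: rest) = pyevalsLoopA 1 rest by
          rw [pyevalsLoopA.eq_def]; simp]
        match rest with
        | [] => rw [pyevalsLoopA.eq_def, pyevalsLoopB.eq_def]; simp
        | e :: rest2 =>
          rw [pyevalsValid.eq_def] at hv
          simp only [reduceIte] at hv
          by_cases he : e = '"' ∨ e = '\'' ∨ e = '\\' ∨ e = 't' ∨ e = 'n' ∨ e = 'r'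
          · rw [if_pos he] at hv
            have hrec := ih rest2 (by simp at hlen ⊢; omega) hv
            rw [pyevalsLoopA.eq_def, pyevalsLoopB.eq_def]
            rcases he with h | h | h | h | h | h <;> subst h <;>
              simp [pyevalsEsc, hrec] <;> rfl
          · rw [if_neg he] at hv
            by_cases hx : e = 'x'
            · subst hx
              rw [if_pos rfl] at hv
              have hdict : pyevalsEsc.get? 'x' = none := by decide
              rw [show pyevalsLoopA 1 ('x' :: rest2) = pyevalsLoopA 2 rest2 by
                rw [pyevalsLoopA.eq_def]; simp]
              match rest2 with
              | [] => rw [pyevalsLoopA.eq_def, pyevalsLoopB.eq_def]; simp [hdict]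
              | [d] =>
                cases hparse : PySem.Int.ofCharsBase? [d] 16 with
                | none => simp [hparse] at hv
                | some num =>
                  simp only [hparse, decide_eq_true_eq] at hv
                  rw [pyevalsLoopA.eq_def, pyevalsLoopB.eq_def]
                  simp [hdict, hparse, hv]
              | d :: d' :: rest3 =>
                cases hparse : PySem.Int.ofCharsBase? [d, d'] 16 with
                | none => simp [hparse] at hv
                | some num =>
                  simp only [hparse, Bool.and_eq_true, decide_eq_true_eq] at hv
                  obtain ⟨⟨hnum, hlt⟩, hv⟩ := hv
                  have hrec := ih rest3 (by simp at hlen ⊢; omega) hv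
                  rw [pyevalsLoopA.eq_def, pyevalsLoopB.eq_def]
                  simp [hdict, hparse, hnum, hlt, hrec]
            · rw [if_neg hx] at hv; simp at hv
      · have hv' : pyevalsValid rest = true := by
          rw [pyevalsValid.eq_def] at hv; simpa [hc] using hv
        have hrec := ih rest (by simp at hlen ⊢; omega) hv'
        rw [pyevalsLoopA.eq_def, pyevalsLoopB.eq_def]
        simp [hc, hrec]

-- ===== VERDICT (by name: the statement is the Claim_ definition above) =====
theorem pyevals_spec : Claim_equal_pyevals := by
  intro s _ hpre
  unfold Spec_pyevals pyevals pyevals_alt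
  exact congrArg String.ofList (pyevals_loops_eq s.toList.length s.toList le_rfl hpre)
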